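-- pv_equiv track=rewrite | github.com/HBinhCT/Q-project | hackerrank/Algorithms/Two Robots/solution.py | twoRobots
-- ===== SOURCE A (Python) =====
-- def twoRobots(m, queries):
--     #
--     # Write your code here.
--     #
--     dp = [0]
--     s = abs(queries[0][1] - queries[0][0])
--     for i in range(1, len(queries)):
--         dp.append(min(dp[j] + (0 if j == 0 else abs(queries[j - 1][1] - queries[i][0])) for j in range(i)))
--         for j in range(i):
--             dp[j] += abs(queries[i - 1][1] - queries[i][0])
--         s += abs(queries[i][1] - queries[i][0])
--     return s + min(dp)
-- ===== SOURCE B (Python) =====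
-- def _min2(a, b):
--     if a is None:
--         return b
--     if b is None:
--         return a
--     return a if a < b else b
--
--
-- def _bisect_left(a, x):
--     lo, hi = 0, len(a)
--     while lo < hi:
--         mid = (lo + hi) // 2
--         if a[mid] < x:
--             lo = mid + 1
--         else:
--             hi = mid
--     return lo
--
--
-- def _bisect_right(a, x):
--     lo, hi = 0, len(a)
--     while lo < hi:
--         mid = (lo + hi) // 2
--         if x < a[mid]:
--             hi = mid
--         else:
--             lo = mid + 1
--     return lo
--
--
-- def _st_build(lo, hi):
--     # empty min-segment-tree over rank interval [lo, hi)
--     if hi - lo == 1: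
--         return ('leaf', None)
--     mid = (lo + hi) // 2
--     return ('node', None, _st_build(lo, mid), _st_build(mid, hi))
--
--
-- def _st_update(t, lo, hi, i, v):
--     # merge value v into position i (persistent: returns the new tree)
--     if hi - lo == 1:
--         return ('leaf', _min2(t[1], v))
--     mid = (lo + hi) // 2
--     if i < mid:
--         l, r = _st_update(t[2], lo, mid, i, v), t[3]
--     else:
--         l, r = t[2], _st_update(t[3], mid, hi, i, v)
--     return ('node', _min2(l[1], r[1]), l, r)
--
--
-- def _st_query(t, lo, hi, ql, qr):
--     # min over positions in [lo, hi) ∩ [ql, qr); None if nothing stored there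
--     if qr <= lo or hi <= ql:
--         return None
--     if ql <= lo and hi <= qr:
--         return t[1]
--     mid = (lo + hi) // 2
--     return _min2(_st_query(t[2], lo, mid, ql, qr),
--                  _st_query(t[3], mid, hi, ql, qr))
--
--
-- def twoRobots(m, queries):
--     # Min-plus DP with the |e - x| transition split into the two linear cases
--     # (e <= x gives (g - e) + x, e >= x gives (g + e) - x), each served by a
--     # min-segment-tree over the coordinate-compressed end points: O(Q log Q).
--     n = len(queries)
--     s = sum(abs(q[1] - q[0]) for q in queries)
--     if n <= 1:
--         return s
--     ends = sorted(set(q[1] for q in queries[:-1]))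
--     size = len(ends)
--     tA = _st_build(0, size)   # stores g - e at rank(e)
--     tB = _st_build(0, size)   # stores g + e at rank(e)
--     D = 0                     # accumulated forced transition cost
--     mn = 0                    # min over all g values (g_0 = 0: partner idle)
--     for k in range(n - 1):
--         x = queries[k + 1][0]
--         qa = _st_query(tA, 0, size, 0, _bisect_right(ends, x))
--         qb = _st_query(tB, 0, size, _bisect_left(ends, x), size)
--         best = 0
--         if qa is not None and qa + x < best:
--             best = qa + x
--         if qb is not None and qb - x < best:
--             best = qb - x
--         e = queries[k][1]
--         t = abs(e - x)
--         g = best - t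
--         D += t
--         if g < mn:
--             mn = g
--         r = _bisect_left(ends, e)
--         tA = _st_update(tA, 0, size, r, g - e)
--         tB = _st_update(tB, 0, size, r, g + e)
--     return s + D + mn
-- ===== Notes on version B (the rewrite author's own statement) =====
-- stated objective: faster
-- what changed: B abandons A's quadratic scan over all previous dp states: it splits the |end - x| transition into its two linear cases and answers each step's minimisation with range-min queries on two point-update min-segment-trees built over the coordinate-compressed end points (plus a running scalar for the uniform additive cost), giving O(Q log Q) instead of O(Q^2).
import Mathlib
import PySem

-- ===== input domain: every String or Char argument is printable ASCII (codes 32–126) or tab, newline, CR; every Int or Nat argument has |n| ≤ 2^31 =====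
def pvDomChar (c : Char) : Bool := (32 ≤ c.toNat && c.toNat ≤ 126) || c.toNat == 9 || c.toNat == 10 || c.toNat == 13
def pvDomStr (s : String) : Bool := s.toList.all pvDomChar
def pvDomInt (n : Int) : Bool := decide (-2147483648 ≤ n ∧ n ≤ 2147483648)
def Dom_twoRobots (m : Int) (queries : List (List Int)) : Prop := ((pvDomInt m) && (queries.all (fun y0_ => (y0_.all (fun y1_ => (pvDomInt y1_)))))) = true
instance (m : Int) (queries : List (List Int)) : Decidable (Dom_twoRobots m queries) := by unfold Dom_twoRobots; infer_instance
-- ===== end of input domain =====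

-- B replaces A's quadratic scan over all previous dp states by two point-update
-- min-segment-trees over the coordinate-compressed end points (the |e - x| transition
-- split into its two linear cases), O(Q log Q) instead of O(Q^2) (objective: faster).

-- queries[i][k] on the admitted inputs (indices 0 and 1 in range); getD is exact there
def pvQ (queries : List (List Int)) (i k : Nat) : Int := (queries.getD i []).getD k 0

-- ===== PORT A =====
-- one iteration of A's `for i in range(1, len(queries))` loop; state = (dp, s)
def twoRobotsStep (queries : List (List Int)) (st : List Int × Int) (i : Nat) : List Int × Int :=
  let dp := st.1
  -- dp.append(min(dp[j] + (0 if j == 0 else abs(queries[j-1][1] - queries[i][0])) for j in range(i)))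
  let newv := (PySem.List.min? ((List.range i).map (fun j =>
      dp.getD j 0 + (if j = 0 then (0 : Int) else |pvQ queries (j-1) 1 - pvQ queries i 0|))) (fun y => y)).getD 0
  let dp2 := dp ++ [newv]
  -- for j in range(i): dp[j] += abs(queries[i-1][1] - queries[i][0])
  let t := |pvQ queries (i-1) 1 - pvQ queries i 0|
  let dp3 := (dp2.take i).map (· + t) ++ dp2.drop i
  (dp3, st.2 + |pvQ queries i 1 - pvQ queries i 0|)

def twoRobots (m : Int) (queries : List (List Int)) : Int :=
  let st := (List.range' 1 (queries.length - 1)).foldl (twoRobotsStep queries)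
      ([0], |pvQ queries 0 1 - pvQ queries 0 0|)
  st.2 + (PySem.List.min? st.1 (fun y => y)).getD 0

-- ===== PORT B =====
-- _min2: min of two optional values, None = "nothing stored"
def pvMin2 : Option Int → Option Int → Option Int
  | none, b => b
  | some a, none => some a
  | some a, some b => some (if a < b then a else b)

-- _bisect_left's while loop (fuel-totalized: fuel = a.length bounds hi - lo, which halves
-- each step); a.getD is exact: mid is always in range when called on 0 ≤ lo < hi ≤ len
def pvBisectLeftGo (a : List Int) (x : Int) : Nat → Nat → Nat → Nat
  | 0, lo, _ => lo
  | fuel + 1, lo, hi =>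
    if lo < hi then
      if a.getD ((lo + hi) / 2) 0 < x then pvBisectLeftGo a x fuel ((lo + hi) / 2 + 1) hi
      else pvBisectLeftGo a x fuel lo ((lo + hi) / 2)
    else lo

def pvBisectLeft (a : List Int) (x : Int) : Nat := pvBisectLeftGo a x a.length 0 a.length

-- _bisect_right's while loop (fuel-totalized like _bisect_left)
def pvBisectRightGo (a : List Int) (x : Int) : Nat → Nat → Nat → Nat
  | 0, lo, _ => lo
  | fuel + 1, lo, hi =>
    if lo < hi then
      if x < a.getD ((lo + hi) / 2) 0 then pvBisectRightGo a x fuel lo ((lo + hi) / 2)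
      else pvBisectRightGo a x fuel ((lo + hi) / 2 + 1) hi
    else lo

def pvBisectRight (a : List Int) (x : Int) : Nat := pvBisectRightGo a x a.length 0 a.length

-- the segment-tree node tuples ('leaf', v) / ('node', v, l, r) of Source B
inductive PvST
  | leaf : Option Int → PvST
  | node : Option Int → PvST → PvST → PvST
deriving DecidableEq, Repr

def PvST.val : PvST → Option Int
  | .leaf v => v
  | .node v _ _ => v

-- _st_build (fuel-totalized: fuel = size bounds hi - lo; Source B never builds an empty interval)
def pvStBuild : Nat → Nat → Nat → PvST
  | 0, _, _ => .leaf none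
  | fuel + 1, lo, hi =>
    if hi ≤ lo + 1 then .leaf none
    else .node none (pvStBuild fuel lo ((lo + hi) / 2)) (pvStBuild fuel ((lo + hi) / 2) hi)

-- _st_update; the recursion follows the tree (in Source B the tree shape always matches the
-- `hi - lo == 1` interval test, so matching on the node is the same branch)
def pvStUpdate : PvST → Nat → Nat → Nat → Option Int → PvST
  | .leaf w, _, _, _, v => .leaf (pvMin2 w v)
  | .node _ l r, lo, hi, i, v =>
    if i < (lo + hi) / 2 then
      let l' := pvStUpdate l lo ((lo + hi) / 2) i v
      .node (pvMin2 l'.val r.val) l' r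
    else
      let r' := pvStUpdate r ((lo + hi) / 2) hi i v
      .node (pvMin2 l.val r'.val) l r'

-- _st_query; same guards in the same order; the partial-overlap case recurses on the
-- children (Source B only reaches it on nodes; the leaf fallback is a totalization guard)
def pvStQuery : PvST → Nat → Nat → Nat → Nat → Option Int
  | t, lo, hi, ql, qr =>
    if qr ≤ lo ∨ hi ≤ ql then none
    else if ql ≤ lo ∧ hi ≤ qr then t.val
    else match t with
      | .leaf _ => none
      | .node _ l r =>
          pvMin2 (pvStQuery l lo ((lo + hi) / 2) ql qr)
                 (pvStQuery r ((lo + hi) / 2) hi ql qr)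

-- one iteration of Source B's `for k in range(n - 1)` loop; state = (tA, tB, D, mn)
def pvAltStep (queries : List (List Int)) (ends : List Int) (size : Nat)
    (st : PvST × PvST × Int × Int) (k : Nat) : PvST × PvST × Int × Int :=
  let tA := st.1
  let tB := st.2.1
  let x := pvQ queries (k + 1) 0
  let qa := pvStQuery tA 0 size 0 (pvBisectRight ends x)
  let qb := pvStQuery tB 0 size (pvBisectLeft ends x) size
  let best : Int := 0
  let best := match qa with
    | some v => if v + x < best then v + x else best
    | none => best
  let best := match qb with
    | some v => if v - x < best then v - x else best
    | none => best
  let e := pvQ queries k 1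
  let t := |e - x|
  let g := best - t
  let r := pvBisectLeft ends e
  (pvStUpdate tA 0 size r (some (g - e)), pvStUpdate tB 0 size r (some (g + e)),
   st.2.2.1 + t, if g < st.2.2.2 then g else st.2.2.2)

def twoRobots_alt (m : Int) (queries : List (List Int)) : Int :=
  let n := queries.length
  let s := (queries.map (fun q => |q.getD 1 0 - q.getD 0 0|)).sum
  if n ≤ 1 then s
  else
    -- ends = sorted(set(q[1] for q in queries[:-1]))
    let ends := PySem.List.sorted
      (PySem.Set.ofList ((PySem.List.slice queries none (some (-1))).map (fun q => q.getD 1 0)))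
      (fun x => x) false
    let size := ends.length
    let st := (List.range (n - 1)).foldl (pvAltStep queries ends size)
      (pvStBuild size 0 size, pvStBuild size 0 size, 0, 0)
    s + st.2.2.1 + st.2.2.2

-- ===== PRECONDITION & SPEC =====
-- A raises IndexError on empty `queries` and on any inner list of length < 2; exactly those are excluded
def Pre_twoRobots (m : Int) (queries : List (List Int)) : Prop :=
  queries ≠ [] ∧ ∀ q ∈ queries, 2 ≤ q.length
instance (m : Int) (queries : List (List Int)) : Decidable (Pre_twoRobots m queries) := by
  unfold Pre_twoRobots; infer_instance
def pvWitness_twoRobots : Int × List (List Int) := (5, [[1, 2], [5, 3], [4, 4]])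

def Spec_twoRobots (m : Int) (queries : List (List Int)) (out : Int) : Prop := out = twoRobots_alt m queries
instance (m : Int) (queries : List (List Int)) (out : Int) : Decidable (Spec_twoRobots m queries out) := by unfold Spec_twoRobots; infer_instance

-- ===== CLAIM (what is proved, stated in full; the proofs are below) =====
def Claim_equal_twoRobots : Prop := ∀ (m : Int) (queries : List (List Int)), Dom_twoRobots m queries → Pre_twoRobots m queries → Spec_twoRobots m queries (twoRobots m queries)

-- ===== LEMMAS AND PROOFS =====

-- ---------- proof-side reference: the one-pass offset recurrence both programs compute ----------
-- reference loop: state = (g, prev_ends, D); g[j+1] = best inter-query cost with the idle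
-- robot parked at e_j, minus the running transition-cost prefix sum D
def pvRefStep (st : List Int × List Int × Int) (pc : List Int × List Int) : List Int × List Int × Int :=
  let g := st.1
  let pe := st.2.1
  let D := st.2.2
  let x := pc.2.getD 0 0
  let best := ((g.drop 1).zip pe).foldl (fun b ge => min b (ge.1 + |ge.2 - x|)) 0
  let t := |pc.1.getD 1 0 - x|
  (g ++ [best - t], pe ++ [pc.1.getD 1 0], D + t)

def pvRef (queries : List (List Int)) : Int :=
  let s := (queries.map (fun q => |q.getD 1 0 - q.getD 0 0|)).sum
  let st := (queries.zip (queries.drop 1)).foldl pvRefStep ([0], ([], 0))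
  s + st.2.2 + (PySem.List.min? st.1 (fun y => y)).getD 0

-- running sum of the per-query travel terms |queries[i][1] - queries[i][0]|
def pvSumTo (queries : List (List Int)) (k : Nat) : Int :=
  ((List.range k).map (fun i => |pvQ queries i 1 - pvQ queries i 0|)).sum

theorem pv_foldl_min_map_add (l : List Int) (c : Int) :
    ∀ a : Int, (l.map (· + c)).foldl min (a + c) = l.foldl min a + c := by
  induction l with
  | nil => intro a; simp
  | cons x xs ih =>
      intro a
      simp only [List.map_cons, List.foldl_cons, min_add_add_right]
      exact ih (min a x)

theorem pv_map_getD_range {α β : Type} (f : α → β) (d : α) (l : List α) :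
    l.map f = (List.range l.length).map (fun i => f (l.getD i d)) := by
  induction l with
  | nil => simp
  | cons x xs ih =>
      simp only [List.map_cons, List.length_cons, List.range_succ_eq_map, List.map_map]
      refine congrArg (f x :: ·) ?_
      rw [ih]
      rfl

theorem pv_zip_drop_one (l : List (List Int)) :
    l.zip (l.drop 1) =
      (List.range (l.length - 1)).map (fun k => (l.getD k [], l.getD (k+1) [])) := by
  match l with
  | [] => simp
  | [q] => simp
  | q :: r :: rs =>
      have ih := pv_zip_drop_one (r :: rs)
      simp only [List.drop_succ_cons, List.drop_zero] at ih ⊢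
      simp only [List.zip_cons_cons, List.length_cons, Nat.add_sub_cancel,
        List.range_succ_eq_map, List.map_cons, List.map_map]
      refine congrArg ((q, r) :: ·) ?_
      rw [show ((r :: rs).length - 1) = rs.length by simp] at ih
      rw [ih]
      rfl

theorem pv_zip_range_map {α : Type} [Inhabited α] (u : List Int) (h : Nat → α) :
    u.zip ((List.range u.length).map h) =
      (List.range u.length).map (fun j => (u.getD j 0, h j)) := by
  induction u generalizing h with
  | nil => simp
  | cons x xs ih =>
      simp only [List.length_cons, List.range_succ_eq_map, List.map_cons, List.map_map,
        List.zip_cons_cons]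
      refine congrArg ((x, h 0) :: ·) ?_
      simp only [Function.comp_def]
      rw [ih (fun j => h (j + 1))]
      exact List.map_congr_left (fun j hj => rfl)

theorem pv_getD_drop_one (l : List Int) (j : Nat) : (l.drop 1).getD j 0 = l.getD (j+1) 0 := by
  cases l <;> simp

theorem pv_getD_map_add (l : List Int) (c : Int) :
    ∀ j : Nat, j < l.length → (l.map (· + c)).getD j 0 = l.getD j 0 + c := by
  induction l with
  | nil => intro j h; cases h
  | cons x xs ih =>
      intro j h
      cases j with
      | zero => rfl
      | succ j => simpa using ih j (by simpa using h)

def pvAfold (queries : List (List Int)) (k : Nat) : List Int × Int :=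
  (List.range k).foldl (fun st j => twoRobotsStep queries st (j+1))
    ([0], |pvQ queries 0 1 - pvQ queries 0 0|)

def pvBfold (queries : List (List Int)) (k : Nat) : List Int × List Int × Int :=
  (List.range k).foldl (fun st j => pvRefStep st (queries.getD j [], queries.getD (j+1) []))
    ([0], ([], 0))

theorem pvAfold_succ (queries : List (List Int)) (k : Nat) :
    pvAfold queries (k+1) = twoRobotsStep queries (pvAfold queries k) (k+1) := by
  simp [pvAfold, List.range_succ]

theorem pvBfold_succ (queries : List (List Int)) (k : Nat) :
    pvBfold queries (k+1) =
      pvRefStep (pvBfold queries k) (queries.getD k [], queries.getD (k+1) []) := by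
  simp [pvBfold, List.range_succ]

-- the coupling invariant between A's loop state and the reference loop state after k iterations
theorem pv_loop_inv (queries : List (List Int)) (k : Nat) :
    (pvAfold queries k).1 = (pvBfold queries k).1.map (· + (pvBfold queries k).2.2) ∧
    (pvAfold queries k).2 = pvSumTo queries (k+1) ∧
    (pvBfold queries k).1.length = k + 1 ∧
    (pvBfold queries k).1.getD 0 0 = 0 ∧
    (pvBfold queries k).2.1 = (List.range k).map (fun j => pvQ queries j 1) := by
  induction k with
  | zero =>
      refine ⟨by simp [pvAfold, pvBfold], ?_, by simp [pvBfold], by simp [pvBfold],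
        by simp [pvBfold]⟩
      simp [pvAfold, pvSumTo, List.range_succ]
  | succ k ih =>
      obtain ⟨hdp, hs, hlen, hhead, hpe⟩ := ih
      rw [pvAfold_succ, pvBfold_succ]
      rcases hA : pvAfold queries k with ⟨dp, s⟩
      rcases hB : pvBfold queries k with ⟨g, pe, D⟩
      rw [hA] at hdp hs
      rw [hB] at hdp hlen hhead hpe
      simp only at hdp hs hlen hhead hpe
      have hglen : g.length = k + 1 := hlen
      -- A's candidate list for the inner minimum, written through g
      have hmapA : (List.range (k+1)).map (fun j =>
            dp.getD j 0 + (if j = 0 then (0 : Int) else |pvQ queries (j-1) 1 - pvQ queries (k+1) 0|)) =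
          D :: (List.range k).map (fun j =>
            (g.getD (j+1) 0 + |pvQ queries j 1 - pvQ queries (k+1) 0|) + D) := by
        rw [List.range_succ_eq_map, List.map_cons, List.map_map]
        have h0 : dp.getD 0 0 = D := by
          rw [hdp, pv_getD_map_add g D 0 (by omega), hhead, zero_add]
        refine congrArg₂ (· :: ·) ?_ ?_
        · show dp.getD 0 0 + (if 0 = 0 then (0:Int) else |pvQ queries (0-1) 1 - pvQ queries (k+1) 0|) = D
          rw [if_pos rfl, h0, add_zero]
        refine List.map_congr_left ?_
        intro j hj
        have hjk : j < k := List.mem_range.mp hj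
        have hgetj : dp.getD (j+1) 0 = g.getD (j+1) 0 + D := by
          rw [hdp, pv_getD_map_add g D (j+1) (by omega)]
        show dp.getD (j+1) 0 +
            (if j + 1 = 0 then (0:Int) else |pvQ queries (j+1-1) 1 - pvQ queries (k+1) 0|) = _
        rw [if_neg (Nat.succ_ne_zero j), Nat.add_sub_cancel, hgetj]
        ring
      -- the reference `best`, as a fold of min over the same base list
      have hzip : (g.drop 1).zip pe =
          (List.range k).map (fun j => ((g.drop 1).getD j 0, pvQ queries j 1)) := by
        have hdl : (g.drop 1).length = k := by simp [hglen]
        rw [hpe, ← hdl, pv_zip_range_map]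
      have hbest : ((g.drop 1).zip pe).foldl
            (fun b ge => min b (ge.1 + |ge.2 - pvQ queries (k+1) 0|)) 0 =
          ((List.range k).map (fun j =>
            g.getD (j+1) 0 + |pvQ queries j 1 - pvQ queries (k+1) 0|)).foldl min 0 := by
        rw [hzip, List.foldl_map, List.foldl_map]
        refine PySem.List.foldl_congr_mem _ _ _ _ ?_
        intro b j hj
        dsimp only
        rw [pv_getD_drop_one]
      have hdplen : dp.length = k + 1 := by rw [hdp]; simp [hglen]
      refine ⟨?_, ?_, ?_, ?_, ?_⟩
      · -- dp₃ = g' map (+ D')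
        show (((dp ++ [(PySem.List.min? ((List.range (k+1)).map (fun j =>
              dp.getD j 0 + (if j = 0 then (0 : Int) else |pvQ queries (j-1) 1 - pvQ queries (k+1) 0|)))
              (fun y => y)).getD 0]).take (k+1)).map (· + |pvQ queries k 1 - pvQ queries (k+1) 0|) ++
            (dp ++ [(PySem.List.min? ((List.range (k+1)).map (fun j =>
              dp.getD j 0 + (if j = 0 then (0 : Int) else |pvQ queries (j-1) 1 - pvQ queries (k+1) 0|)))
              (fun y => y)).getD 0]).drop (k+1)) =
          (g ++ [((g.drop 1).zip pe).foldl (fun b ge => min b (ge.1 + |ge.2 - pvQ queries (k+1) 0|)) 0 -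
              |pvQ queries k 1 - pvQ queries (k+1) 0|]).map
            (· + (D + |pvQ queries k 1 - pvQ queries (k+1) 0|))
        rw [List.take_left' hdplen, List.drop_left' hdplen]
        rw [hmapA, PySem.List.min?_id_cons, Option.getD_some]
        have hfold := pv_foldl_min_map_add ((List.range k).map (fun j =>
            g.getD (j+1) 0 + |pvQ queries j 1 - pvQ queries (k+1) 0|)) D 0
        rw [zero_add] at hfold
        rw [show ((List.range k).map (fun j =>
            (g.getD (j+1) 0 + |pvQ queries j 1 - pvQ queries (k+1) 0|) + D)) =
          ((List.range k).map (fun j =>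
            g.getD (j+1) 0 + |pvQ queries j 1 - pvQ queries (k+1) 0|)).map (· + D) by
          rw [List.map_map]; rfl]
        rw [hfold, hbest, hdp, List.map_append, List.map_map]
        refine congrArg₂ (· ++ ·) (List.map_congr_left ?_) ?_
        · intro v _
          show v + D + |pvQ queries k 1 - pvQ queries (k+1) 0| = _
          ring
        · simp only [List.map_cons, List.map_nil]
          refine congrArg (· :: []) ?_
          ring
      · -- s accumulates the next travel term
        show s + |pvQ queries (k+1) 1 - pvQ queries (k+1) 0| = pvSumTo queries (k+1+1)
        rw [hs]
        simp only [pvSumTo, List.range_succ, List.map_append, List.map_cons, List.map_nil,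
          List.sum_append, List.sum_cons, List.sum_nil]
        ring
      · show (g ++ [_]).length = k + 1 + 1
        simp [hglen]
      · show (g ++ [_]).getD 0 0 = 0
        match g, hhead, hglen with
        | (a :: t), hh, _ => simpa using hh
      · show pe ++ [pvQ queries k 1] = (List.range (k+1)).map (fun j => pvQ queries j 1)
        rw [List.range_succ, List.map_append, hpe]
        rfl

-- A equals the reference
theorem pv_main (m : Int) (queries : List (List Int)) :
    twoRobots m queries = pvRef queries := by
  match queries with
  | [] => rfl
  | q :: rest =>
    obtain ⟨hdp, hs, hlen, hhead, hpe⟩ := pv_loop_inv (q :: rest) rest.length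
    have hn : (q :: rest).length - 1 = rest.length := by simp
    have hA : twoRobots m (q :: rest) =
        (pvAfold (q :: rest) rest.length).2 +
          (PySem.List.min? (pvAfold (q :: rest) rest.length).1 (fun y => y)).getD 0 := by
      show (((List.range' 1 ((q :: rest).length - 1)).foldl (twoRobotsStep (q :: rest))
          ([0], |pvQ (q :: rest) 0 1 - pvQ (q :: rest) 0 0|)).2 + _) = _
      rw [hn, List.range'_eq_map_range, List.foldl_map]
      have hfun : (fun (st : List Int × Int) (j : Nat) => twoRobotsStep (q :: rest) st (1 + j)) =
          (fun st j => twoRobotsStep (q :: rest) st (j + 1)) := by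
        funext st j; rw [Nat.add_comm]
      rw [hfun]; rfl
    have hB : pvRef (q :: rest) =
        ((q :: rest).map (fun q => |q.getD 1 0 - q.getD 0 0|)).sum +
          (pvBfold (q :: rest) rest.length).2.2 +
          (PySem.List.min? (pvBfold (q :: rest) rest.length).1 (fun y => y)).getD 0 := by
      show (((q :: rest).map _).sum +
          (((q :: rest).zip ((q :: rest).drop 1)).foldl pvRefStep ([0], ([], 0))).2.2 + _) = _
      rw [pv_zip_drop_one, hn, List.foldl_map]
      rfl
    have hsum : ((q :: rest).map (fun q => |q.getD 1 0 - q.getD 0 0|)).sum =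
        pvSumTo (q :: rest) (rest.length + 1) := by
      rw [pv_map_getD_range (fun q => |q.getD 1 0 - q.getD 0 0|) [] (q :: rest)]
      rfl
    rw [hA, hB, hs, hsum, hdp]
    rcases hBv : pvBfold (q :: rest) rest.length with ⟨g, pe, D⟩
    rw [hBv] at hlen
    simp only at hlen ⊢
    match g, hlen with
    | (a :: t), _ =>
      rw [List.map_cons, PySem.List.min?_id_cons, PySem.List.min?_id_cons,
        Option.getD_some, Option.getD_some, pv_foldl_min_map_add]
      ring


-- ---------- pvMin2 algebra ----------
theorem pvMin2_some_some (a b : Int) : pvMin2 (some a) (some b) = some (min a b) := by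
  simp only [pvMin2, min_def]
  by_cases h : a < b
  · rw [if_pos h, if_pos (le_of_lt h)]
  · rw [if_neg h]
    by_cases h2 : a ≤ b
    · rw [if_pos h2, le_antisymm h2 (not_lt.mp h)]
    · rw [if_neg h2]

theorem pvMin2_none_right (a : Option Int) : pvMin2 a none = a := by
  cases a <;> rfl

theorem pvMin2_none_left (a : Option Int) : pvMin2 none a = a := rfl

theorem pvMin2_assoc (a b c : Option Int) : pvMin2 (pvMin2 a b) c = pvMin2 a (pvMin2 b c) := by
  cases a <;> cases b <;> cases c <;>
    simp [pvMin2_some_some, pvMin2_none_left, pvMin2_none_right, min_assoc]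

theorem pvMin2_comm (a b : Option Int) : pvMin2 a b = pvMin2 b a := by
  cases a <;> cases b <;>
    simp [pvMin2_some_some, pvMin2_none_left, pvMin2_none_right, min_comm]

theorem pvMin2_left_comm (a b c : Option Int) : pvMin2 a (pvMin2 b c) = pvMin2 b (pvMin2 a c) := by
  rw [← pvMin2_assoc, pvMin2_comm a b, pvMin2_assoc]

theorem pvMin2_absorb (a b : Option Int) : pvMin2 a (pvMin2 a b) = pvMin2 a b := by
  rw [← pvMin2_assoc]
  cases a <;> simp [pvMin2_some_some, pvMin2_none_left, min_self]

-- ---------- range minimum of an Option-valued function ----------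
def pvRangeMin (f : Nat → Option Int) (lo hi : Nat) : Option Int :=
  (List.range' lo (hi - lo)).foldr (fun i acc => pvMin2 (f i) acc) none

theorem pv_foldr_min2_base {α : Type} (f : α → Option Int) (l : List α) (b : Option Int) :
    l.foldr (fun a acc => pvMin2 (f a) acc) b =
      pvMin2 (l.foldr (fun a acc => pvMin2 (f a) acc) none) b := by
  induction l with
  | nil => rfl
  | cons x t ih => simp only [List.foldr_cons, ih, pvMin2_assoc]

theorem pvRangeMin_empty (f : Nat → Option Int) (lo hi : Nat) (h : hi ≤ lo) :
    pvRangeMin f lo hi = none := by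
  unfold pvRangeMin
  rw [show hi - lo = 0 by omega]
  rfl

theorem pvRangeMin_split (f : Nat → Option Int) (lo mid hi : Nat)
    (h1 : lo ≤ mid) (h2 : mid ≤ hi) :
    pvRangeMin f lo hi = pvMin2 (pvRangeMin f lo mid) (pvRangeMin f mid hi) := by
  unfold pvRangeMin
  have hr : List.range' lo (hi - lo) = List.range' lo (mid - lo) ++ List.range' mid (hi - mid) := by
    have := List.range'_append_1 (s := lo) (m := mid - lo) (n := hi - mid)
    rw [show lo + (mid - lo) = mid by omega] at this
    rw [this]
    congr 1
    omega
  rw [hr, List.foldr_append, pv_foldr_min2_base]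

-- ---------- segment-tree well-formedness ----------
def pvStOk : PvST → Nat → Nat → (Nat → Option Int) → Prop
  | .leaf v, lo, hi, f => hi = lo + 1 ∧ v = f lo
  | .node v l r, lo, hi, f =>
      lo + 2 ≤ hi ∧ pvStOk l lo ((lo + hi) / 2) f ∧ pvStOk r ((lo + hi) / 2) hi f ∧
        v = pvMin2 l.val r.val

theorem pvStOk_val (t : PvST) : ∀ lo hi f, pvStOk t lo hi f → t.val = pvRangeMin f lo hi := by
  induction t with
  | leaf v =>
      intro lo hi f h
      obtain ⟨h1, h2⟩ := h
      subst h1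
      unfold pvRangeMin
      rw [show lo + 1 - lo = 1 by omega]
      simp [PvST.val, h2, List.range', pvMin2_none_right]
  | node v l r ihl ihr =>
      intro lo hi f h
      obtain ⟨h1, h2, h3, h4⟩ := h
      show v = _
      rw [h4, ihl _ _ _ h2, ihr _ _ _ h3,
        ← pvRangeMin_split f lo ((lo + hi) / 2) hi (by omega) (by omega)]

theorem pvStOk_congr (t : PvST) : ∀ lo hi f g, pvStOk t lo hi f →
    (∀ j, lo ≤ j → j < hi → f j = g j) → pvStOk t lo hi g := by
  induction t with
  | leaf v =>
      intro lo hi f g h hc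
      obtain ⟨h1, h2⟩ := h
      exact ⟨h1, by rw [h2, hc lo (le_refl lo) (by omega)]⟩
  | node v l r ihl ihr =>
      intro lo hi f g h hc
      obtain ⟨h1, h2, h3, h4⟩ := h
      exact ⟨h1, ihl _ _ _ _ h2 (fun j hj1 hj2 => hc j hj1 (by omega)),
        ihr _ _ _ _ h3 (fun j hj1 hj2 => hc j (by omega) hj2), h4⟩

theorem pvStBuild_val (fuel lo hi : Nat) : (pvStBuild fuel lo hi).val = none := by
  cases fuel with
  | zero => rfl
  | succ k =>
      show PvST.val (if hi ≤ lo + 1 then .leaf none else _) = none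
      split
      · rfl
      · rfl

theorem pvStBuild_ok (fuel : Nat) : ∀ lo hi, hi - lo ≤ fuel → lo < hi →
    pvStOk (pvStBuild fuel lo hi) lo hi (fun _ => none) := by
  induction fuel with
  | zero => intro lo hi hf h; omega
  | succ k ih =>
      intro lo hi hf h
      show pvStOk (if hi ≤ lo + 1 then .leaf none else _) lo hi _
      by_cases hle : hi ≤ lo + 1
      · rw [if_pos hle]
        exact ⟨by omega, rfl⟩
      · rw [if_neg hle]
        refine ⟨by omega, ?_, ?_, ?_⟩
        · exact ih lo ((lo + hi) / 2) (by omega) (by omega)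
        · exact ih ((lo + hi) / 2) hi (by omega) (by omega)
        · rw [pvStBuild_val, pvStBuild_val]
          rfl

theorem pvStUpdate_ok (t : PvST) : ∀ lo hi f i v, pvStOk t lo hi f → lo ≤ i → i < hi →
    pvStOk (pvStUpdate t lo hi i v) lo hi
      (fun j => if j = i then pvMin2 (f j) v else f j) := by
  induction t with
  | leaf w =>
      intro lo hi f i v h hi1 hi2
      obtain ⟨h1, h2⟩ := h
      have hilo : i = lo := by omega
      exact ⟨h1, by simp [pvStUpdate, PvST.val, h2, hilo]⟩
  | node w l r ihl ihr =>
      intro lo hi f i v h hi1 hi2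
      obtain ⟨h1, h2, h3, h4⟩ := h
      show pvStOk (if i < (lo + hi) / 2 then _ else _) lo hi _
      by_cases hmid : i < (lo + hi) / 2
      · rw [if_pos hmid]
        refine ⟨h1, ihl _ _ _ _ _ h2 hi1 hmid, ?_, rfl⟩
        exact pvStOk_congr _ _ _ _ _ h3 (fun j hj1 hj2 => by rw [if_neg (by omega)])
      · rw [if_neg hmid]
        refine ⟨h1, ?_, ihr _ _ _ _ _ h3 (by omega) hi2, rfl⟩
        exact pvStOk_congr _ _ _ _ _ h2 (fun j hj1 hj2 => by rw [if_neg (by omega)])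

-- glue for the query recursion
theorem pvRangeMin_glue (f : Nat → Option Int) (lo mid hi ql qr : Nat)
    (h1 : lo ≤ mid) (h2 : mid ≤ hi) :
    pvMin2 (pvRangeMin f (max lo ql) (min mid qr)) (pvRangeMin f (max mid ql) (min hi qr)) =
      pvRangeMin f (max lo ql) (min hi qr) := by
  by_cases hab : min hi qr ≤ max lo ql
  · rw [pvRangeMin_empty f _ _ (by omega), pvRangeMin_empty f _ _ (by omega),
      pvRangeMin_empty f _ _ hab]
    rfl
  · push Not at hab
    by_cases hm1 : mid ≤ max lo ql
    · rw [pvRangeMin_empty f _ _ (by omega)]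
      rw [pvMin2_none_left]
      congr 1
      omega
    · by_cases hm2 : min hi qr ≤ mid
      · rw [pvRangeMin_empty f (max mid ql) _ (by omega), pvMin2_none_right]
        congr 1
        omega
      · rw [show min mid qr = mid by omega, show max mid ql = mid by omega]
        exact (pvRangeMin_split f _ mid _ (by omega) (by omega)).symm

theorem pvStQuery_ok (t : PvST) : ∀ lo hi f ql qr, pvStOk t lo hi f →
    pvStQuery t lo hi ql qr = pvRangeMin f (max lo ql) (min hi qr) := by
  induction t with
  | leaf w =>
      intro lo hi f ql qr h
      obtain ⟨h1, h2⟩ := h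
      unfold pvStQuery
      by_cases hg1 : qr ≤ lo ∨ hi ≤ ql
      · rw [if_pos hg1, pvRangeMin_empty f _ _ (by omega)]
      · rw [if_neg hg1]
        have hg2 : ql ≤ lo ∧ hi ≤ qr := by omega
        rw [if_pos hg2]
        have := pvStOk_val (PvST.leaf w) lo hi f ⟨h1, h2⟩
        rw [this]
        congr 1 <;> omega
  | node w l r ihl ihr =>
      intro lo hi f ql qr h
      obtain ⟨h1, h2, h3, h4⟩ := h
      unfold pvStQuery
      by_cases hg1 : qr ≤ lo ∨ hi ≤ ql
      · rw [if_pos hg1, pvRangeMin_empty f _ _ (by omega)]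
      · rw [if_neg hg1]
        by_cases hg2 : ql ≤ lo ∧ hi ≤ qr
        · rw [if_pos hg2]
          have := pvStOk_val (PvST.node w l r) lo hi f ⟨h1, h2, h3, h4⟩
          rw [this]
          congr 1 <;> omega
        · rw [if_neg hg2]
          show pvMin2 (pvStQuery l lo ((lo + hi) / 2) ql qr)
              (pvStQuery r ((lo + hi) / 2) hi ql qr) = _
          rw [ihl _ _ _ _ _ h2, ihr _ _ _ _ _ h3]
          exact pvRangeMin_glue f lo ((lo + hi) / 2) hi ql qr (by omega) (by omega)


-- ---------- bisection correctness on a sorted list ----------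
theorem pvBLGo_spec (a : List Int) (x : Int)
    (hmono : ∀ i j : Nat, i ≤ j → j < a.length → a.getD i 0 ≤ a.getD j 0) :
    ∀ fuel lo hi, hi - lo ≤ fuel → lo ≤ hi → hi ≤ a.length →
      (∀ i, i < lo → a.getD i 0 < x) →
      (∀ i, hi ≤ i → i < a.length → x ≤ a.getD i 0) →
      (∀ i, i < pvBisectLeftGo a x fuel lo hi → a.getD i 0 < x) ∧
      (∀ i, pvBisectLeftGo a x fuel lo hi ≤ i → i < a.length → x ≤ a.getD i 0) ∧
      pvBisectLeftGo a x fuel lo hi ≤ a.length := by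
  intro fuel
  induction fuel with
  | zero =>
    intro lo hi hn hlh hha h1 h2
    have hgo : pvBisectLeftGo a x 0 lo hi = lo := rfl
    rw [hgo]
    exact ⟨fun i hi' => h1 i (by omega), fun i hi1 hi2 => h2 i (by omega) hi2, by omega⟩
  | succ k ih =>
    intro lo hi hn hlh hha h1 h2
    show _ ∧ _ ∧ pvBisectLeftGo a x (k+1) lo hi ≤ a.length
    unfold pvBisectLeftGo
    by_cases h : lo < hi
    · rw [if_pos h]
      by_cases hc : a.getD ((lo + hi) / 2) 0 < x
      · rw [if_pos hc]
        refine ih _ _ (by omega) (by omega) hha ?_ h2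
        intro i hi'
        exact lt_of_le_of_lt (hmono i ((lo + hi) / 2) (by omega) (by omega)) hc
      · rw [if_neg hc]
        refine ih _ _ (by omega) (by omega) (by omega) h1 ?_
        intro i hi1 hi2
        exact le_trans (not_lt.mp hc) (hmono _ i hi1 hi2)
    · rw [if_neg h]
      exact ⟨fun i hi' => h1 i (by omega), fun i hi1 hi2 => h2 i (by omega) hi2, by omega⟩

theorem pvBisectLeft_spec (a : List Int) (x : Int)
    (hmono : ∀ i j : Nat, i ≤ j → j < a.length → a.getD i 0 ≤ a.getD j 0) :
    (∀ i, i < pvBisectLeft a x → a.getD i 0 < x) ∧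
    (∀ i, pvBisectLeft a x ≤ i → i < a.length → x ≤ a.getD i 0) ∧
    pvBisectLeft a x ≤ a.length := by
  exact pvBLGo_spec a x hmono a.length 0 a.length (by omega) (by omega) (le_refl _)
    (fun i hi => by omega) (fun i hi1 hi2 => by omega)

theorem pvBRGo_spec (a : List Int) (x : Int)
    (hmono : ∀ i j : Nat, i ≤ j → j < a.length → a.getD i 0 ≤ a.getD j 0) :
    ∀ fuel lo hi, hi - lo ≤ fuel → lo ≤ hi → hi ≤ a.length →
      (∀ i, i < lo → a.getD i 0 ≤ x) →
      (∀ i, hi ≤ i → i < a.length → x < a.getD i 0) →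
      (∀ i, i < pvBisectRightGo a x fuel lo hi → a.getD i 0 ≤ x) ∧
      (∀ i, pvBisectRightGo a x fuel lo hi ≤ i → i < a.length → x < a.getD i 0) ∧
      pvBisectRightGo a x fuel lo hi ≤ a.length := by
  intro fuel
  induction fuel with
  | zero =>
    intro lo hi hn hlh hha h1 h2
    have hgo : pvBisectRightGo a x 0 lo hi = lo := rfl
    rw [hgo]
    exact ⟨fun i hi' => h1 i (by omega), fun i hi1 hi2 => h2 i (by omega) hi2, by omega⟩
  | succ k ih =>
    intro lo hi hn hlh hha h1 h2
    show _ ∧ _ ∧ pvBisectRightGo a x (k+1) lo hi ≤ a.length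
    unfold pvBisectRightGo
    by_cases h : lo < hi
    · rw [if_pos h]
      by_cases hc : x < a.getD ((lo + hi) / 2) 0
      · rw [if_pos hc]
        refine ih _ _ (by omega) (by omega) (by omega) h1 ?_
        intro i hi1 hi2
        exact lt_of_lt_of_le hc (hmono _ i hi1 hi2)
      · rw [if_neg hc]
        refine ih _ _ (by omega) (by omega) hha ?_ h2
        intro i hi'
        exact le_trans (hmono i ((lo + hi) / 2) (by omega) (by omega)) (not_lt.mp hc)
    · rw [if_neg h]
      exact ⟨fun i hi' => h1 i (by omega), fun i hi1 hi2 => h2 i (by omega) hi2, by omega⟩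

theorem pvBisectRight_spec (a : List Int) (x : Int)
    (hmono : ∀ i j : Nat, i ≤ j → j < a.length → a.getD i 0 ≤ a.getD j 0) :
    (∀ i, i < pvBisectRight a x → a.getD i 0 ≤ x) ∧
    (∀ i, pvBisectRight a x ≤ i → i < a.length → x < a.getD i 0) ∧
    pvBisectRight a x ≤ a.length := by
  exact pvBRGo_spec a x hmono a.length 0 a.length (by omega) (by omega) (le_refl _)
    (fun i hi => by omega) (fun i hi1 hi2 => by omega)

theorem pv_mono_of_pairwise (a : List Int) (hs : a.Pairwise (· < ·)) :
    ∀ i j : Nat, i ≤ j → j < a.length → a.getD i 0 ≤ a.getD j 0 := by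
  intro i j hij hj
  rcases Nat.lt_or_ge i j with h | h
  · rw [List.getD_eq_getElem a 0 (by omega), List.getD_eq_getElem a 0 hj]
    exact le_of_lt (List.pairwise_iff_getElem.mp hs i j (by omega) hj h)
  · have : i = j := by omega
    rw [this]

-- the rank of a member of a strictly sorted list: bisect_left finds it exactly
theorem pv_rank_mem (a : List Int) (e : Int) (hs : a.Pairwise (· < ·)) (he : e ∈ a) :
    pvBisectLeft a e < a.length ∧ a.getD (pvBisectLeft a e) 0 = e := by
  have hmono := pv_mono_of_pairwise a hs
  obtain ⟨h1, h2, h3⟩ := pvBisectLeft_spec a e hmono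
  obtain ⟨idx, hidx, heq⟩ := List.mem_iff_getElem.mp he
  have hidxD : a.getD idx 0 = e := by rw [List.getD_eq_getElem a 0 hidx, heq]
  have hge : pvBisectLeft a e ≤ idx := by
    by_contra hcon
    exact absurd hidxD (ne_of_lt (h1 idx (by omega)))
  have hlt : pvBisectLeft a e < a.length := by omega
  refine ⟨hlt, le_antisymm ?_ (h2 _ (le_refl _) hlt)⟩
  calc a.getD (pvBisectLeft a e) 0 ≤ a.getD idx 0 := hmono _ idx hge hidx
    _ = e := hidxD

theorem pv_rank_lt_br_iff (a : List Int) (e x : Int) (hs : a.Pairwise (· < ·)) (he : e ∈ a) :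
    (pvBisectLeft a e < pvBisectRight a x ↔ e ≤ x) := by
  have hmono := pv_mono_of_pairwise a hs
  obtain ⟨hrlt, hrget⟩ := pv_rank_mem a e hs he
  obtain ⟨h1, h2, h3⟩ := pvBisectRight_spec a x hmono
  constructor
  · intro h
    rw [← hrget]
    exact h1 _ h
  · intro h
    by_contra hcon
    have := h2 (pvBisectLeft a e) (by omega) hrlt
    rw [hrget] at this
    omega
  
theorem pv_bl_le_rank_iff (a : List Int) (e x : Int) (hs : a.Pairwise (· < ·)) (he : e ∈ a) :
    (pvBisectLeft a x ≤ pvBisectLeft a e ↔ x ≤ e) := by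
  have hmono := pv_mono_of_pairwise a hs
  obtain ⟨hrlt, hrget⟩ := pv_rank_mem a e hs he
  obtain ⟨h1, h2, h3⟩ := pvBisectLeft_spec a x hmono
  constructor
  · intro h
    rw [← hrget]
    exact h2 _ h hrlt
  · intro h
    by_contra hcon
    have := h1 (pvBisectLeft a e) (by omega)
    rw [hrget] at this
    omega


-- ---------- conditional minima over the entry list ----------
def pvCondMin (c : Int × Int → Prop) [DecidablePred c] (h : Int × Int → Int)
    (E : List (Int × Int)) : Option Int :=
  E.foldr (fun p acc => if c p then pvMin2 (some (h p)) acc else acc) none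

-- the function a segment tree holds: per rank, the min of h over entries whose end has that rank
def pvFGen (ends : List Int) (h : Int × Int → Int) (E : List (Int × Int)) (r : Nat) : Option Int :=
  E.foldr (fun p acc => if pvBisectLeft ends p.2 = r then pvMin2 (some (h p)) acc else acc) none

theorem pv_foldr_cond_base (c : Int × Int → Prop) [DecidablePred c] (h : Int × Int → Int)
    (E : List (Int × Int)) (b : Option Int) :
    E.foldr (fun p acc => if c p then pvMin2 (some (h p)) acc else acc) b =
      pvMin2 (E.foldr (fun p acc => if c p then pvMin2 (some (h p)) acc else acc) none) b := by
  induction E with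
  | nil => rfl
  | cons p t ih =>
      simp only [List.foldr_cons, ih]
      by_cases hc : c p
      · rw [if_pos hc, if_pos hc, pvMin2_assoc]
      · rw [if_neg hc, if_neg hc]

theorem pvCondMin_append_single (c : Int × Int → Prop) [DecidablePred c] (h : Int × Int → Int)
    (E : List (Int × Int)) (p : Int × Int) :
    pvCondMin c h (E ++ [p]) =
      if c p then pvMin2 (pvCondMin c h E) (some (h p)) else pvCondMin c h E := by
  unfold pvCondMin
  rw [List.foldr_append]
  simp only [List.foldr_cons, List.foldr_nil]
  by_cases hc : c p
  · rw [if_pos hc, if_pos hc, pvMin2_none_right]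
    exact pv_foldr_cond_base c h E (some (h p))
  · rw [if_neg hc, if_neg hc]

theorem pvCondMin_congr (c c' : Int × Int → Prop) [DecidablePred c] [DecidablePred c']
    (h : Int × Int → Int) (E : List (Int × Int)) (hcc : ∀ p ∈ E, (c p ↔ c' p)) :
    pvCondMin c h E = pvCondMin c' h E := by
  unfold pvCondMin
  induction E with
  | nil => rfl
  | cons p t ih =>
      simp only [List.foldr_cons]
      rw [ih (fun q hq => hcc q (List.mem_cons_of_mem p hq))]
      by_cases hc : c p
      · rw [if_pos hc, if_pos ((hcc p List.mem_cons_self).mp hc)]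
      · rw [if_neg hc, if_neg (fun h' => hc ((hcc p List.mem_cons_self).mpr h'))]

theorem pvRangeMin_none (lo hi : Nat) : pvRangeMin (fun _ => none) lo hi = none := by
  unfold pvRangeMin
  generalize List.range' lo (hi - lo) = l
  induction l with
  | nil => rfl
  | cons i t ih => rw [List.foldr_cons]; exact ih

theorem pvRangeMin_succ_left (f : Nat → Option Int) (lo hi : Nat) (h : lo < hi) :
    pvRangeMin f lo hi = pvMin2 (f lo) (pvRangeMin f (lo + 1) hi) := by
  unfold pvRangeMin
  rw [show hi - lo = (hi - (lo + 1)) + 1 by omega, List.range'_succ, List.foldr_cons]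

theorem pvRangeMin_update (f : Nat → Option Int) (r0 : Nat) (v : Option Int) :
    ∀ n lo hi, hi - lo = n →
    pvRangeMin (fun r => if r0 = r then pvMin2 v (f r) else f r) lo hi =
      if lo ≤ r0 ∧ r0 < hi then pvMin2 v (pvRangeMin f lo hi) else pvRangeMin f lo hi := by
  intro n
  induction n with
  | zero =>
      intro lo hi hn
      rw [pvRangeMin_empty _ lo hi (by omega), pvRangeMin_empty f lo hi (by omega),
        if_neg (by omega)]
  | succ k ih =>
      intro lo hi hn
      rw [pvRangeMin_succ_left _ lo hi (by omega), pvRangeMin_succ_left f lo hi (by omega),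
        ih (lo + 1) hi (by omega)]
      by_cases h0 : r0 = lo
      · subst h0
        rw [if_pos rfl, if_neg (by omega), if_pos (by omega), ← pvMin2_assoc,
          pvMin2_comm v (f r0), pvMin2_assoc]
      · rw [if_neg h0]
        by_cases h1 : lo + 1 ≤ r0 ∧ r0 < hi
        · rw [if_pos h1, if_pos (by omega), pvMin2_left_comm]
        · rw [if_neg h1, if_neg (by omega)]

theorem pvRangeMin_fgen (ends : List Int) (h : Int × Int → Int) (E : List (Int × Int))
    (lo hi : Nat) :
    pvRangeMin (pvFGen ends h E) lo hi =
      pvCondMin (fun p => lo ≤ pvBisectLeft ends p.2 ∧ pvBisectLeft ends p.2 < hi) h E := by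
  induction E with
  | nil => exact pvRangeMin_none lo hi
  | cons p t ih =>
      have hf : pvFGen ends h (p :: t) =
          fun r => if pvBisectLeft ends p.2 = r then pvMin2 (some (h p)) (pvFGen ends h t r)
            else pvFGen ends h t r := rfl
      rw [hf, pvRangeMin_update (pvFGen ends h t) (pvBisectLeft ends p.2) (some (h p))
        (hi - lo) lo hi rfl, ih]
      unfold pvCondMin
      simp only [List.foldr_cons]

-- running minimum as a conditional minimum
theorem pv_foldl_min_eq_condTrue (f : Int × Int → Int) (E : List (Int × Int)) :
    ∀ c : Int, some (E.foldl (fun b p => min b (f p)) c) =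
      pvMin2 (some c) (pvCondMin (fun _ => True) f E) := by
  induction E with
  | nil => intro c; simp [pvCondMin, pvMin2_none_right]
  | cons p t ih =>
      intro c
      show some (t.foldl (fun b p => min b (f p)) (min c (f p))) = _
      rw [ih (min c (f p))]
      show _ = pvMin2 (some c) (pvMin2 (some (f p)) (pvCondMin (fun _ => True) f t))
      rw [← pvMin2_assoc, pvMin2_some_some]

theorem pv_map_add_min2 (a b : Option Int) (x : Int) :
    Option.map (· + x) (pvMin2 a b) = pvMin2 (a.map (· + x)) (b.map (· + x)) := by
  cases a <;> cases b <;>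
    simp [pvMin2_some_some, pvMin2_none_left, pvMin2_none_right, min_add_add_right]

theorem pv_map_sub_min2 (a b : Option Int) (x : Int) :
    Option.map (· - x) (pvMin2 a b) = pvMin2 (a.map (· - x)) (b.map (· - x)) := by
  cases a <;> cases b <;>
    simp [pvMin2_some_some, pvMin2_none_left, pvMin2_none_right, min_sub_sub_right]

-- |e - x| split into its two linear cases, one conditional minimum each
theorem pv_split_abs (x : Int) (E : List (Int × Int)) :
    pvMin2 (Option.map (· + x) (pvCondMin (fun p => p.2 ≤ x) (fun p => p.1 - p.2) E))
           (Option.map (· - x) (pvCondMin (fun p => x ≤ p.2) (fun p => p.1 + p.2) E)) =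
      pvCondMin (fun _ => True) (fun p => p.1 + |p.2 - x|) E := by
  induction E with
  | nil => rfl
  | cons p t ih =>
      have hA : pvCondMin (fun p => p.2 ≤ x) (fun p => p.1 - p.2) (p :: t) =
          if p.2 ≤ x then pvMin2 (some (p.1 - p.2))
            (pvCondMin (fun p => p.2 ≤ x) (fun p => p.1 - p.2) t)
          else pvCondMin (fun p => p.2 ≤ x) (fun p => p.1 - p.2) t := rfl
      have hB : pvCondMin (fun p => x ≤ p.2) (fun p => p.1 + p.2) (p :: t) =
          if x ≤ p.2 then pvMin2 (some (p.1 + p.2))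
            (pvCondMin (fun p => x ≤ p.2) (fun p => p.1 + p.2) t)
          else pvCondMin (fun p => x ≤ p.2) (fun p => p.1 + p.2) t := rfl
      have hT : pvCondMin (fun _ => True) (fun p => p.1 + |p.2 - x|) (p :: t) =
          pvMin2 (some (p.1 + |p.2 - x|))
            (pvCondMin (fun _ => True) (fun p => p.1 + |p.2 - x|) t) := by
        unfold pvCondMin
        simp only [List.foldr_cons, if_pos trivial]
      rw [hA, hB, hT, ← ih]
      rcases lt_trichotomy p.2 x with hlt | heq | hgt
      · rw [if_pos (le_of_lt hlt), if_neg (by omega), pv_map_add_min2]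
        simp only [Option.map_some]
        rw [pvMin2_assoc]
        congr 2
        rw [abs_of_neg (by omega)]
        ring
      · rw [if_pos (by omega), if_pos (by omega), pv_map_add_min2, pv_map_sub_min2]
        simp only [Option.map_some]
        rw [show p.1 - p.2 + x = p.1 + |p.2 - x| by rw [heq, sub_self, abs_zero]; ring,
            show p.1 + p.2 - x = p.1 + |p.2 - x| by rw [heq, sub_self, abs_zero]; ring]
        rw [pvMin2_assoc,
          pvMin2_left_comm
            (Option.map (· + x) (pvCondMin (fun p => p.2 ≤ x) (fun p => p.1 - p.2) t))
            (some (p.1 + |p.2 - x|))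
            (Option.map (· - x) (pvCondMin (fun p => x ≤ p.2) (fun p => p.1 + p.2) t)),
          pvMin2_absorb]
      · rw [if_neg (by omega), if_pos (le_of_lt hgt), pv_map_sub_min2]
        simp only [Option.map_some]
        rw [pvMin2_left_comm]
        congr 2
        rw [abs_of_pos (by omega)]
        ring

-- Source B's two-branch best computation, as an Option minimum
theorem pv_best_eq (qa qb : Option Int) (x : Int) :
    some ((fun best : Int => match qb with
            | some v => if v - x < best then v - x else best
            | none => best)
          ((fun best : Int => match qa with
            | some v => if v + x < best then v + x else best
            | none => best) 0)) =
      pvMin2 (some 0) (pvMin2 (Option.map (· + x) qa) (Option.map (· - x) qb)) := by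
  cases qa <;> cases qb <;>
    simp only [Option.map_some, Option.map_none, pvMin2_some_some, pvMin2_none_left,
      pvMin2_none_right] <;>
    · congr 1
      simp only [min_def]
      split_ifs <;> omega

-- ---------- B equals the reference (segment-tree correctness) ----------

-- the coordinate-compressed, strictly sorted end points (the `ends` of twoRobots_alt)
def pvEnds (queries : List (List Int)) : List Int :=
  PySem.List.sorted
    (PySem.Set.ofList ((PySem.List.slice queries none (some (-1))).map (fun q => q.getD 1 0)))
    (fun x => x) false

def pvAltFold (queries : List (List Int)) (k : Nat) : PvST × PvST × Int × Int :=
  (List.range k).foldl (pvAltStep queries (pvEnds queries) (pvEnds queries).length)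
    (pvStBuild (pvEnds queries).length 0 (pvEnds queries).length,
     pvStBuild (pvEnds queries).length 0 (pvEnds queries).length, 0, 0)

theorem pvAltFold_succ (queries : List (List Int)) (k : Nat) :
    pvAltFold queries (k+1) =
      pvAltStep queries (pvEnds queries) (pvEnds queries).length (pvAltFold queries k) k := by
  simp [pvAltFold, List.range_succ]

theorem pv_ends_sorted (queries : List (List Int)) : (pvEnds queries).Pairwise (· < ·) :=
  PySem.List.sorted_ofList_pairwise_lt _

theorem pv_e_mem (queries : List (List Int)) (j : Nat) (hj : j < queries.length - 1) :
    pvQ queries j 1 ∈ pvEnds queries := by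
  unfold pvEnds
  rw [PySem.List.mem_sorted, PySem.Set.mem_ofList, PySem.List.slice_to_neg_one]
  have hjl : j < queries.dropLast.length := by simp [List.length_dropLast]; omega
  refine List.mem_map.mpr ⟨queries.dropLast[j], List.getElem_mem hjl, ?_⟩
  rw [List.getElem_dropLast]
  show _ = pvQ queries j 1
  unfold pvQ
  rw [List.getD_eq_getElem queries [] (by omega)]

theorem pv_ends_pos (queries : List (List Int)) (hq : 2 ≤ queries.length) :
    0 < (pvEnds queries).length :=
  List.length_pos_of_mem (pv_e_mem queries 0 (by omega))

-- (if a < b then a else b) = min for the mn update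
theorem pv_if_min (a b : Int) : (if a < b then a else b) = min b a := by
  rw [min_def]
  split_ifs <;> omega

-- the invariant coupling Source B's loop state to the reference loop state
theorem pv_alt_inv (queries : List (List Int)) (hq : 2 ≤ queries.length) :
    ∀ k, k ≤ queries.length - 1 →
      (pvAltFold queries k).2.2.1 = (pvBfold queries k).2.2 ∧
      (pvAltFold queries k).2.2.2 = ((pvBfold queries k).1.drop 1).foldl min 0 ∧
      pvStOk (pvAltFold queries k).1 0 (pvEnds queries).length
        (pvFGen (pvEnds queries) (fun p => p.1 - p.2)
          (((pvBfold queries k).1.drop 1).zip (pvBfold queries k).2.1)) ∧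
      pvStOk (pvAltFold queries k).2.1 0 (pvEnds queries).length
        (pvFGen (pvEnds queries) (fun p => p.1 + p.2)
          (((pvBfold queries k).1.drop 1).zip (pvBfold queries k).2.1)) := by
  have hsorted := pv_ends_sorted queries
  have hsize := pv_ends_pos queries hq
  intro k
  induction k with
  | zero =>
      intro _
      refine ⟨rfl, rfl, ?_, ?_⟩ <;>
      · show pvStOk (pvStBuild (pvEnds queries).length 0 (pvEnds queries).length) 0
            (pvEnds queries).length _
        exact pvStOk_congr _ _ _ _ _
          (pvStBuild_ok (pvEnds queries).length 0 (pvEnds queries).length (by omega) hsize)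
          (fun j _ _ => rfl)
  | succ k ih =>
      intro hk1
      obtain ⟨hD, hmn, hokA, hokB⟩ := ih (by omega)
      obtain ⟨_, _, hlen, hhead, hpe⟩ := pv_loop_inv queries k
      rw [pvAltFold_succ, pvBfold_succ]
      rcases hA : pvAltFold queries k with ⟨tA, tB, D, mn⟩
      rcases hB : pvBfold queries k with ⟨g, pe, Dr⟩
      rw [hA] at hD hmn hokA hokB
      rw [hB] at hD hmn hokA hokB hlen hhead hpe
      simp only at hD hmn hokA hokB hlen hhead hpe
      -- notation
      have hpelen : pe.length = k := by rw [hpe, List.length_map, List.length_range]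
      have hEmem : ∀ p ∈ (g.drop 1).zip pe, p.2 ∈ pvEnds queries := by
        intro p hp
        have h2 := (List.of_mem_zip hp).2
        rw [hpe] at h2
        obtain ⟨j, hj, hje⟩ := List.mem_map.mp h2
        rw [← hje]
        exact pv_e_mem queries j (by have := List.mem_range.mp hj; omega)
      have hrankn : ∀ p ∈ (g.drop 1).zip pe,
          pvBisectLeft (pvEnds queries) p.2 < (pvEnds queries).length :=
        fun p hp => (pv_rank_mem _ _ hsorted (hEmem p hp)).1
      -- the query results
      have hqa : pvStQuery tA 0 (pvEnds queries).length 0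
            (pvBisectRight (pvEnds queries) (pvQ queries (k+1) 0)) =
          pvCondMin (fun p => p.2 ≤ pvQ queries (k+1) 0) (fun p => p.1 - p.2)
            ((g.drop 1).zip pe) := by
        rw [pvStQuery_ok tA 0 _ _ _ _ hokA, Nat.max_self, pvRangeMin_fgen]
        refine pvCondMin_congr _ _ _ _ ?_
        intro p hp
        have hr := hrankn p hp
        have hbr := pv_rank_lt_br_iff (pvEnds queries) p.2 (pvQ queries (k+1) 0) hsorted
          (hEmem p hp)
        constructor
        · intro hcc
          exact hbr.mp (lt_of_lt_of_le hcc.2 (Nat.min_le_right _ _))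
        · intro hcc
          exact ⟨Nat.zero_le _, Nat.lt_min.mpr ⟨hr, hbr.mpr hcc⟩⟩
      have hqb : pvStQuery tB 0 (pvEnds queries).length
            (pvBisectLeft (pvEnds queries) (pvQ queries (k+1) 0)) (pvEnds queries).length =
          pvCondMin (fun p => pvQ queries (k+1) 0 ≤ p.2) (fun p => p.1 + p.2)
            ((g.drop 1).zip pe) := by
        rw [pvStQuery_ok tB 0 _ _ _ _ hokB, Nat.min_self,
          Nat.max_eq_right (Nat.zero_le _), pvRangeMin_fgen]
        refine pvCondMin_congr _ _ _ _ ?_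
        intro p hp
        have hr := hrankn p hp
        have hbl := pv_bl_le_rank_iff (pvEnds queries) p.2 (pvQ queries (k+1) 0) hsorted
          (hEmem p hp)
        constructor
        · intro hcc
          exact hbl.mp hcc.1
        · intro hcc
          exact ⟨hbl.mpr hcc, hr⟩
      -- the best value equals the reference inner minimum
      have hbest :
          (fun best : Int => match pvStQuery tB 0 (pvEnds queries).length
              (pvBisectLeft (pvEnds queries) (pvQ queries (k+1) 0)) (pvEnds queries).length with
            | some v => if v - pvQ queries (k+1) 0 < best then v - pvQ queries (k+1) 0 else best
            | none => best)
          ((fun best : Int => match pvStQuery tA 0 (pvEnds queries).length 0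
              (pvBisectRight (pvEnds queries) (pvQ queries (k+1) 0)) with
            | some v => if v + pvQ queries (k+1) 0 < best then v + pvQ queries (k+1) 0 else best
            | none => best) 0) =
          ((g.drop 1).zip pe).foldl
            (fun b ge => min b (ge.1 + |ge.2 - pvQ queries (k+1) 0|)) 0 := by
        apply Option.some.inj
        rw [pv_best_eq, hqa, hqb, pv_split_abs,
          ← pv_foldl_min_eq_condTrue (fun p => p.1 + |p.2 - pvQ queries (k+1) 0|)
            ((g.drop 1).zip pe) 0]
      -- the appended entry list
      have hdrop : ∀ v : Int, ((g ++ [v]).drop 1) = g.drop 1 ++ [v] := by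
        intro v
        rw [List.drop_append_of_le_length (by omega)]
      have hziplen : (g.drop 1).length = pe.length := by
        rw [List.length_drop, hlen, hpelen]
        omega
      have hzip' : ∀ v e : Int, ((g ++ [v]).drop 1).zip (pe ++ [e]) =
          (g.drop 1).zip pe ++ [(v, e)] := by
        intro v e
        rw [hdrop, List.zip_append hziplen]
        rfl
      -- the updated trees remain well-formed for the appended entry list
      have hupd : ∀ (t : PvST) (hfun : Int × Int → Int) (v e : Int),
          e ∈ pvEnds queries →
          hfun (v, e) = v - e ∨ hfun (v, e) = v + e →
          pvStOk t 0 (pvEnds queries).length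
            (pvFGen (pvEnds queries) hfun ((g.drop 1).zip pe)) →
          pvStOk (pvStUpdate t 0 (pvEnds queries).length (pvBisectLeft (pvEnds queries) e)
              (some (hfun (v, e)))) 0 (pvEnds queries).length
            (pvFGen (pvEnds queries) hfun ((g.drop 1).zip pe ++ [(v, e)])) := by
        intro t hfun v e he _ hok
        have hrlt := (pv_rank_mem _ _ hsorted he).1
        refine pvStOk_congr _ _ _ _ _
          (pvStUpdate_ok t 0 _ _ _ (some (hfun (v, e))) hok (Nat.zero_le _) hrlt) ?_
        intro j _ _
        have happ : pvFGen (pvEnds queries) hfun ((g.drop 1).zip pe ++ [(v, e)]) j =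
            if pvBisectLeft (pvEnds queries) e = j
              then pvMin2 (pvFGen (pvEnds queries) hfun ((g.drop 1).zip pe) j)
                (some (hfun (v, e)))
              else pvFGen (pvEnds queries) hfun ((g.drop 1).zip pe) j :=
          pvCondMin_append_single (fun p => pvBisectLeft (pvEnds queries) p.2 = j) hfun
            ((g.drop 1).zip pe) (v, e)
        rw [happ]
        by_cases hjr : j = pvBisectLeft (pvEnds queries) e
        · rw [if_pos hjr, if_pos hjr.symm]
        · rw [if_neg hjr, if_neg (fun hcc => hjr hcc.symm)]
      -- now discharge the four conjuncts of the invariant at k+1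
      have hek : pvQ queries k 1 ∈ pvEnds queries := pv_e_mem queries k (by omega)
      have hstepA : pvAltStep queries (pvEnds queries) (pvEnds queries).length (tA, tB, D, mn) k =
          (pvStUpdate tA 0 (pvEnds queries).length
              (pvBisectLeft (pvEnds queries) (pvQ queries k 1))
              (some ((((fun best : Int => match pvStQuery tB 0 (pvEnds queries).length
              (pvBisectLeft (pvEnds queries) (pvQ queries (k+1) 0)) (pvEnds queries).length with
            | some v => if v - pvQ queries (k+1) 0 < best then v - pvQ queries (k+1) 0 else best
            | none => best)
          ((fun best : Int => match pvStQuery tA 0 (pvEnds queries).length 0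
              (pvBisectRight (pvEnds queries) (pvQ queries (k+1) 0)) with
            | some v => if v + pvQ queries (k+1) 0 < best then v + pvQ queries (k+1) 0 else best
            | none => best) 0)) - |pvQ queries k 1 - pvQ queries (k+1) 0|) - pvQ queries k 1)),
           pvStUpdate tB 0 (pvEnds queries).length
              (pvBisectLeft (pvEnds queries) (pvQ queries k 1))
              (some ((((fun best : Int => match pvStQuery tB 0 (pvEnds queries).length
              (pvBisectLeft (pvEnds queries) (pvQ queries (k+1) 0)) (pvEnds queries).length with
            | some v => if v - pvQ queries (k+1) 0 < best then v - pvQ queries (k+1) 0 else best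
            | none => best)
          ((fun best : Int => match pvStQuery tA 0 (pvEnds queries).length 0
              (pvBisectRight (pvEnds queries) (pvQ queries (k+1) 0)) with
            | some v => if v + pvQ queries (k+1) 0 < best then v + pvQ queries (k+1) 0 else best
            | none => best) 0)) - |pvQ queries k 1 - pvQ queries (k+1) 0|) + pvQ queries k 1)),
           D + |pvQ queries k 1 - pvQ queries (k+1) 0|,
           if ((fun best : Int => match pvStQuery tB 0 (pvEnds queries).length
              (pvBisectLeft (pvEnds queries) (pvQ queries (k+1) 0)) (pvEnds queries).length with
            | some v => if v - pvQ queries (k+1) 0 < best then v - pvQ queries (k+1) 0 else best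
            | none => best)
          ((fun best : Int => match pvStQuery tA 0 (pvEnds queries).length 0
              (pvBisectRight (pvEnds queries) (pvQ queries (k+1) 0)) with
            | some v => if v + pvQ queries (k+1) 0 < best then v + pvQ queries (k+1) 0 else best
            | none => best) 0)) - |pvQ queries k 1 - pvQ queries (k+1) 0| < mn
             then ((fun best : Int => match pvStQuery tB 0 (pvEnds queries).length
              (pvBisectLeft (pvEnds queries) (pvQ queries (k+1) 0)) (pvEnds queries).length with
            | some v => if v - pvQ queries (k+1) 0 < best then v - pvQ queries (k+1) 0 else best
            | none => best)
          ((fun best : Int => match pvStQuery tA 0 (pvEnds queries).length 0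
              (pvBisectRight (pvEnds queries) (pvQ queries (k+1) 0)) with
            | some v => if v + pvQ queries (k+1) 0 < best then v + pvQ queries (k+1) 0 else best
            | none => best) 0)) - |pvQ queries k 1 - pvQ queries (k+1) 0| else mn) := rfl
      have hstepR : pvRefStep (g, pe, Dr) (queries.getD k [], queries.getD (k+1) []) =
          (g ++ [(((g.drop 1).zip pe).foldl
            (fun b ge => min b (ge.1 + |ge.2 - pvQ queries (k+1) 0|)) 0) - |pvQ queries k 1 - pvQ queries (k+1) 0|],
           pe ++ [pvQ queries k 1],
           Dr + |pvQ queries k 1 - pvQ queries (k+1) 0|) := rfl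
      rw [hstepA, hstepR, hbest]
      refine ⟨?_, ?_, ?_, ?_⟩
      · show D + |pvQ queries k 1 - pvQ queries (k+1) 0| =
            Dr + |pvQ queries k 1 - pvQ queries (k+1) 0|
        rw [hD]
      · show (if (((g.drop 1).zip pe).foldl
            (fun b ge => min b (ge.1 + |ge.2 - pvQ queries (k+1) 0|)) 0) - |pvQ queries k 1 - pvQ queries (k+1) 0| < mn
              then (((g.drop 1).zip pe).foldl
            (fun b ge => min b (ge.1 + |ge.2 - pvQ queries (k+1) 0|)) 0) - |pvQ queries k 1 - pvQ queries (k+1) 0| else mn) = _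
        rw [hmn, pv_if_min]
        show _ = ((g ++ [(((g.drop 1).zip pe).foldl
            (fun b ge => min b (ge.1 + |ge.2 - pvQ queries (k+1) 0|)) 0) - |pvQ queries k 1 - pvQ queries (k+1) 0|]).drop 1).foldl min 0
        rw [hdrop, List.foldl_append]
        simp only [List.foldl_cons, List.foldl_nil]
      · show pvStOk (pvStUpdate tA 0 _ _ _) 0 _ _
        rw [hzip']
        exact hupd tA (fun p => p.1 - p.2)
          ((((g.drop 1).zip pe).foldl
            (fun b ge => min b (ge.1 + |ge.2 - pvQ queries (k+1) 0|)) 0) - |pvQ queries k 1 - pvQ queries (k+1) 0|)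
          (pvQ queries k 1) hek (Or.inl rfl) hokA
      · show pvStOk (pvStUpdate tB 0 _ _ _) 0 _ _
        rw [hzip']
        exact hupd tB (fun p => p.1 + p.2)
          ((((g.drop 1).zip pe).foldl
            (fun b ge => min b (ge.1 + |ge.2 - pvQ queries (k+1) 0|)) 0) - |pvQ queries k 1 - pvQ queries (k+1) 0|)
          (pvQ queries k 1) hek (Or.inr rfl) hokB

theorem pvRef_fold (queries : List (List Int)) : pvRef queries =
    (queries.map (fun q => |q.getD 1 0 - q.getD 0 0|)).sum +
      (pvBfold queries (queries.length - 1)).2.2 +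
      (PySem.List.min? (pvBfold queries (queries.length - 1)).1 (fun y => y)).getD 0 := by
  unfold pvRef pvBfold
  rw [pv_zip_drop_one, List.foldl_map]

theorem pv_alt (m : Int) (queries : List (List Int)) :
    twoRobots_alt m queries = pvRef queries := by
  by_cases hn : queries.length ≤ 1
  · match queries, hn with
    | [], _ => simp [twoRobots_alt, pvRef, PySem.List.min?_id_cons]
    | [q], _ => simp [twoRobots_alt, pvRef, PySem.List.min?_id_cons]
  · have hq : 2 ≤ queries.length := by omega
    obtain ⟨hD, hmn, -, -⟩ := pv_alt_inv queries hq (queries.length - 1) (le_refl _)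
    have h1 : twoRobots_alt m queries =
        (queries.map (fun q => |q.getD 1 0 - q.getD 0 0|)).sum +
          (pvAltFold queries (queries.length - 1)).2.2.1 +
          (pvAltFold queries (queries.length - 1)).2.2.2 := by
      unfold twoRobots_alt
      rw [if_neg hn]
      rfl
    rw [h1, pvRef_fold, hD, hmn]
    obtain ⟨-, -, hlen, hhead, -⟩ := pv_loop_inv queries (queries.length - 1)
    rcases hg : (pvBfold queries (queries.length - 1)).1 with - | ⟨a, t⟩
    · rw [hg] at hlen
      simp at hlen
    · rw [hg] at hhead
      have ha : a = 0 := by simpa using hhead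
      rw [PySem.List.min?_id_cons, Option.getD_some, ha]
      simp only [List.drop_succ_cons, List.drop_zero]

-- ===== VERDICT (by name: the statement is the Claim_ definition above) =====
theorem twoRobots_spec : Claim_equal_twoRobots := by
  intro m queries _ _
  unfold Spec_twoRobots
  rw [pv_alt m queries]
  exact pv_main m queries
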